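-- pv_equiv track=rewrite | github.com/deepshadow25/AlgorithmTest | 프로그래머스/unrated/133502. 햄버거 만들기/햄버거 만들기.py | solution
-- ===== SOURCE A (Python) =====
-- def solution(ingredient):
--     answer = 0
--     i = 0
--
--     while i <= len(ingredient):
--         if ingredient[i:i+4] == [1,2,3,1]:
--             answer += 1
--             del (ingredient[i:i+4])
--             i = i - 3
--         i += 1
--
--     return answer
-- ===== SOURCE B (Python) =====
-- def solution(ingredient):
--     answer = 0
--     stack = []
--     for x in ingredient:
--         stack.append(x)
--         if stack[-4:] == [1, 2, 3, 1]:
--             del stack[-4:]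
--             answer += 1
--     return answer
-- ===== Notes on version B (the rewrite author's own statement) =====
-- stated objective: faster
-- what changed: Replaces A's index-rescanning while loop with slice deletion and backtracking (i -= 3) on the mutated list by a single left-to-right pass that pushes items on a stack and pops whenever the top four equal [1,2,3,1].
import Mathlib
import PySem

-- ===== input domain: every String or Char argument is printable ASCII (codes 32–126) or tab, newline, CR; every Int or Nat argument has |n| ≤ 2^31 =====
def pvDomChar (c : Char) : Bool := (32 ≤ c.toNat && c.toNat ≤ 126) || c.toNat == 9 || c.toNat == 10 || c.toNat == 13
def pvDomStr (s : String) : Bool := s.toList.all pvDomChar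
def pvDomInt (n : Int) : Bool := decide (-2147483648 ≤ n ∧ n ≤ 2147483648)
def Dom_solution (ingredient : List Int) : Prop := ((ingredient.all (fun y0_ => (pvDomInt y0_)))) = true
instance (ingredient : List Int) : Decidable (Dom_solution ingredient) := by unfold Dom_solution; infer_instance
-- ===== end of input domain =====

-- B replaces A's quadratic rescanning while-loop (slice compare, slice delete, back up 3 indices)
-- by a single stack pass; equivalence is about the RETURN value only (Python A mutates its
-- argument list in place via `del`, B does not).

-- ===== PORT A =====

def pvPat : List Int := [1, 2, 3, 1]

-- Python `del l[a:b]` keeps l[:a] and l[b:]; exact whenever the normalized start ≤ normalized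
-- stop, which holds at every call site below (b = a + 4, and the deleting branch is taken only
-- when the slice l[a:b] equals [1,2,3,1], hence has length 4).
def pvDelSlice (l : List Int) (a b : Int) : List Int :=
  PySem.List.slice l none (some a) ++ PySem.List.slice l (some b) none

-- termination fact cited by loopA's decreasing_by
lemma pvDelSlice_length (l : List Int) (i : Int)
    (h : PySem.List.slice l (some i) (some (i + 4)) = pvPat) :
    (pvDelSlice l i (i + 4)).length + 4 = l.length := by
  have hlen : (PySem.List.slice l (some i) (some (i + 4))).length = 4 := by rw [h]; rfl
  rw [PySem.List.length_slice] at hlen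
  have h1 := PySem.List.clampIdx_le l.length i
  have h2 := PySem.List.clampIdx_le l.length (i + 4)
  unfold pvDelSlice
  rw [← PySem.List.slice_zero_start, PySem.List.slice_some_none, List.length_append,
    PySem.List.length_slice, List.length_drop]
  have h0 : PySem.List.clampIdx l.length (0 : Int) = 0 := by
    have := PySem.List.clampIdx_natCast l.length 0
    simpa using this
  omega

-- the while loop of A: state (current list, i, answer); the loop re-reads len(ingredient)
-- of the mutated list each iteration, as the Python does
def loopA (l : List Int) (i a : Int) : Int :=
  if _hle : i ≤ (l.length : Int) then
    if hm : PySem.List.slice l (some i) (some (i + 4)) = pvPat then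
      loopA (pvDelSlice l i (i + 4)) (i - 3 + 1) (a + 1)
    else
      loopA l (i + 1) a
  else a
termination_by ((l.length : Int) + 1 - i).toNat
decreasing_by
  · have := pvDelSlice_length l i hm; omega
  · omega

def solution (ingredient : List Int) : Int := loopA ingredient 0 0

-- ===== PORT B =====

-- one iteration of B's for loop: push x, pop four if the top of the stack is [1,2,3,1]
def stepB (s : List Int × Int) (x : Int) : List Int × Int :=
  let st := s.1 ++ [x]
  if PySem.List.slice st (some (-4)) none = pvPat then
    (PySem.List.slice st none (some (-4)), s.2 + 1)
  else (st, s.2)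

def solution_alt (ingredient : List Int) : Int :=
  (ingredient.foldl stepB ([], 0)).2

-- ===== PRECONDITION & SPEC =====
def Spec_solution (ingredient : List Int) (out : Int) : Prop := out = solution_alt ingredient
instance (ingredient : List Int) (out : Int) : Decidable (Spec_solution ingredient out) := by unfold Spec_solution; infer_instance

-- ===== CLAIM (what is proved, stated in full; the proofs are below) =====
def Claim_equal_solution : Prop := ∀ (ingredient : List Int), Dom_solution ingredient → Spec_solution ingredient (solution ingredient)

-- ===== LEMMAS AND PROOFS =====

lemma slice_eq_win (l : List Int) (i : Int) (h : 0 ≤ i) :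
    PySem.List.slice l (some i) (some (i + 4)) = (l.drop i.toNat).take 4 := by
  rw [PySem.List.slice_toNat l h (by omega)]
  congr 1
  omega

lemma neg_window (l : List Int) (i : Int) (h1 : -4 ≤ i) (h2 : i < 0) :
    PySem.List.slice l (some i) (some (i + 4)) ≠ pvPat := by
  intro h
  have hlen : (PySem.List.slice l (some i) (some (i + 4))).length = 4 := by rw [h]; rfl
  rw [PySem.List.length_slice] at hlen
  have h3 : PySem.List.clampIdx l.length (i + 4) ≤ 3 := by
    have e : i + 4 = (((i + 4).toNat : Nat) : Int) := by omega
    rw [e, PySem.List.clampIdx_natCast]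
    omega
  omega

lemma last4_short (m : List Int) (h : m.length < 4) :
    PySem.List.slice m (some (-4)) none ≠ pvPat := by
  rw [PySem.List.slice_from_neg_ofNat m 4 (by norm_num)]
  intro hp
  have := congrArg List.length hp
  simp [pvPat] at this
  omega

lemma last4_take (l : List Int) (m : Nat) (h4 : 4 ≤ m) (hm : m ≤ l.length) :
    PySem.List.slice (l.take m) (some (-4)) none = (l.drop (m - 4)).take 4 := by
  rw [PySem.List.slice_from_neg_ofNat _ 4 (by norm_num), List.length_take,
    Nat.min_eq_left hm, List.drop_take]
  congr 1
  omega

lemma B_add (r : List Int) (st : List Int) (c : Int) :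
    List.foldl stepB (st, c) r
      = ((List.foldl stepB (st, 0) r).1, c + (List.foldl stepB (st, 0) r).2) := by
  induction r generalizing st c with
  | nil => simp
  | cons x r ih =>
    simp only [List.foldl_cons]
    by_cases h : PySem.List.slice (st ++ [x]) (some (-4)) none = pvPat
    · simp only [stepB, h, if_pos]
      rw [ih _ (c + 1), ih _ (0 + 1)]
      simp only [Prod.mk.injEq, true_and]
      ring
    · simp only [stepB, h, if_neg, not_false_iff]
      rw [ih _ c, ih _ 0]

lemma B_nopop (r : List Int) (st : List Int) (c : Int)
    (h : ∀ p, p <+: r → PySem.List.slice (st ++ p) (some (-4)) none ≠ pvPat) :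
    List.foldl stepB (st, c) r = (st ++ r, c) := by
  induction r generalizing st c with
  | nil => simp
  | cons x r ih =>
    simp only [List.foldl_cons]
    have hx : PySem.List.slice (st ++ [x]) (some (-4)) none ≠ pvPat :=
      h [x] ⟨r, rfl⟩
    simp only [stepB, hx, if_neg, not_false_iff]
    rw [ih (st ++ [x]) c (fun p hp => by
      have := h (x :: p) (by obtain ⟨t, ht⟩ := hp; exact ⟨t, by simp [← ht]⟩)
      simpa [List.append_assoc] using this)]
    simp

lemma win_append_left (l s : List Int) (j k : Nat) (hk : k + 4 ≤ j) (hj : j ≤ l.length) :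
    ((l.take j ++ s).drop k).take 4 = (l.drop k).take 4 := by
  rw [List.drop_append_of_le_length (by simp; omega),
    List.take_append_of_le_length (by simp; omega), List.drop_take]
  rw [List.take_take]
  congr 1
  omega

lemma B_red (l : List Int) (j : Nat) (hw : (l.drop j).take 4 = pvPat) (hlen : j + 4 ≤ l.length)
    (hmin : ∀ k, k < j → (l.drop k).take 4 ≠ pvPat) :
    (l.foldl stepB ([], 0)).2
      = 1 + ((l.take j ++ l.drop (j + 4)).foldl stepB ([], 0)).2 := by
  have pref : ∀ p : List Int, p <+: l → p.length ≤ j + 3 →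
      PySem.List.slice p (some (-4)) none ≠ pvPat := by
    intro p hp hplen
    rw [List.prefix_iff_eq_take.mp hp]
    by_cases hc : p.length < 4
    · exact last4_short _ (by simp; omega)
    · rw [last4_take l p.length (by omega) (by omega)]
      exact hmin (p.length - 4) (by omega)
  have prefTake : ∀ b : Nat, b ≤ j + 3 →
      ∀ p : List Int, p <+: l.take b → PySem.List.slice (([] : List Int) ++ p) (some (-4)) none ≠ pvPat := by
    intro b hb p hp
    rw [List.nil_append]
    exact pref p (hp.trans (List.take_prefix b l))
      (by have := hp.length_le; simp at this; omega)
  have hj3 : j + 3 < l.length := by omega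
  have htc : l.take (j + 3) ++ [l[j + 3]] = l.take (j + 4) := by
    have := List.take_concat_get (l := l) (i := j + 3) hj3
    simpa [List.concat_eq_append] using this
  have run1 : List.foldl stepB (([] : List Int), (0 : Int)) (l.take (j + 3)) = (l.take (j + 3), 0) := by
    simpa using B_nopop (l.take (j + 3)) [] 0 (prefTake (j + 3) le_rfl)
  have hmatch : PySem.List.slice (l.take (j + 3) ++ [l[j + 3]]) (some (-4)) none = pvPat := by
    rw [htc, last4_take l (j + 4) (by omega) (by omega)]
    simpa using hw
  have hpop : PySem.List.slice (l.take (j + 3) ++ [l[j + 3]]) none (some (-4)) = l.take j := by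
    rw [htc, PySem.List.slice_to_neg_ofNat _ 4 (by norm_num), List.length_take,
      Nat.min_eq_left (by omega), List.take_take]
    congr 1
    omega
  have step1 : stepB (l.take (j + 3), (0 : Int)) l[j + 3] = (l.take j, 1) := by
    simp only [stepB, hmatch, if_pos, hpop]
    norm_num
  have run2 : List.foldl stepB (([] : List Int), (0 : Int)) (l.take j) = (l.take j, 0) := by
    have hh : ∀ p : List Int, p <+: l.take j →
        PySem.List.slice (([] : List Int) ++ p) (some (-4)) none ≠ pvPat := by
      intro p hp
      rw [List.nil_append]
      exact pref p (hp.trans (List.take_prefix j l))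
        (by have := hp.length_le; simp at this; omega)
    simpa using B_nopop (l.take j) [] 0 hh
  have hdec : l = l.take (j + 3) ++ (l[j + 3] :: l.drop (j + 4)) := by
    conv_lhs => rw [← List.take_append_drop (j + 3) l]
    rw [List.drop_eq_getElem_cons hj3]
  calc (l.foldl stepB ([], 0)).2
      = ((l.take (j + 3) ++ (l[j + 3] :: l.drop (j + 4))).foldl stepB ([], 0)).2 := by
        rw [← hdec]
    _ = ((l.drop (j + 4)).foldl stepB (l.take j, 1)).2 := by
        rw [List.foldl_append, run1, List.foldl_cons, step1]
    _ = 1 + ((l.drop (j + 4)).foldl stepB (l.take j, 0)).2 := by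
        rw [B_add]
    _ = 1 + ((l.take j ++ l.drop (j + 4)).foldl stepB ([], 0)).2 := by
        rw [List.foldl_append, run2]

lemma B_none (l : List Int) (h : ∀ k, (l.drop k).take 4 ≠ pvPat) :
    (l.foldl stepB (([] : List Int), (0 : Int))).2 = 0 := by
  have := B_nopop l [] 0 (by
    intro p hp
    rw [List.nil_append, List.prefix_iff_eq_take.mp hp]
    by_cases hc : p.length < 4
    · exact last4_short _ (by simp; omega)
    · rw [last4_take l p.length (by omega) (by have := hp.length_le; omega)]
      exact h _)
  rw [this]

lemma win_boundary (l : List Int) (k : Nat) (hlen : k + 3 + 4 ≤ l.length)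
    (hw : (l.drop (k + 3)).take 4 = pvPat)
    (hbad : ((l.take (k + 3) ++ l.drop (k + 3 + 4)).drop k).take 4 = pvPat) :
    (l.drop k).take 4 = pvPat := by
  have hA : ((l.take (k + 3) ++ l.drop (k + 3 + 4)).drop k).take 4
      = (l.drop k).take 3 ++ (l.drop (k + 3 + 4)).take 1 := by
    rw [List.drop_append_of_le_length (by simp; omega), List.drop_take, List.take_append]
    have h3 : k + 3 - k = 3 := by omega
    rw [h3]
    have hXlen : ((l.drop k).take 3).length = 3 := by simp; omega
    rw [List.take_take, hXlen]
    norm_num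
  have h1 : (l.drop k).take 4 = (l.drop k).take 3 ++ (l.drop (k + 3)).take 1 := by
    conv_lhs => rw [← List.take_append_drop 3 (l.drop k)]
    rw [List.take_append]
    have hXlen : ((l.drop k).take 3).length = 3 := by simp; omega
    rw [List.take_take, hXlen, List.drop_drop]
    norm_num
  have tail1 : (l.drop (k + 3)).take 1 = [1] := by
    have : (l.drop (k + 3)).take 1 = ((l.drop (k + 3)).take 4).take 1 := by
      rw [List.take_take]
      norm_num
    rw [this, hw]
    rfl
  rw [hA] at hbad
  have hE : (l.drop k).take 3 = [1, 2, 3] := by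
    have : (l.drop k).take 3 ++ (l.drop (k + 3 + 4)).take 1
        = [1, 2, 3] ++ [1] := by rw [hbad]; rfl
    exact (List.append_inj this (by simp; omega)).1
  rw [h1, hE, tail1]
  rfl

lemma loopA_eq_countB (l : List Int) (i a : Int) (h4 : -4 ≤ i)
    (hk : ∀ k : Nat, (k : Int) < i → (l.drop k).take 4 ≠ pvPat) :
    loopA l i a = a + (l.foldl stepB (([] : List Int), (0 : Int))).2 := by
  induction l, i, a using loopA.induct with
  | case1 l i a hle hm ih =>
    have hi : 0 ≤ i := by
      by_contra hneg
      exact neg_window l i h4 (by omega) hm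
    have hw : (l.drop i.toNat).take 4 = pvPat := by
      rw [← slice_eq_win l i hi]; exact hm
    have hlen4 : i.toNat + 4 ≤ l.length := by
      have := congrArg List.length hw
      simp [pvPat] at this
      omega
    have hmin : ∀ k, k < i.toNat → (l.drop k).take 4 ≠ pvPat := fun k hk' => hk k (by omega)
    have hdel : pvDelSlice l i (i + 4) = l.take i.toNat ++ l.drop (i.toNat + 4) := by
      unfold pvDelSlice
      rw [PySem.List.slice_to l hi, PySem.List.slice_from l (by omega : (0:Int) ≤ i + 4)]
      have e1 : (i + 4).toNat = i.toNat + 4 := by omega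
      rw [e1]
    rw [loopA, dif_pos hle, dif_pos hm]
    rw [hdel] at ih ⊢
    rw [ih (by omega) ?_]
    · rw [B_red l i.toNat hw hlen4 hmin]
      ring
    · intro k hki
      by_cases hc : k + 4 ≤ i.toNat
      · rw [win_append_left l _ i.toNat k hc (by omega)]
        exact hmin k (by omega)
      · have hkj : i.toNat = k + 3 := by omega
        intro hbad
        apply hmin k (by omega)
        rw [hkj] at hw hbad
        exact win_boundary l k (by omega) hw hbad
  | case2 l i a hle hm ih =>
    rw [loopA, dif_pos hle, dif_neg hm]
    apply ih (by omega)
    intro k hki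
    by_cases hc : (k : Int) < i
    · exact hk k hc
    · have hik : i.toNat = k := by omega
      intro hbad
      apply hm
      rw [slice_eq_win l i (by omega), hik]
      exact hbad
  | case3 l i a hle =>
    rw [loopA, dif_neg hle]
    have hz : (l.foldl stepB (([] : List Int), (0 : Int))).2 = 0 := by
      apply B_none
      intro k
      by_cases hc : (k : Int) < i
      · exact hk k hc
      · have : l.drop k = [] := List.drop_eq_nil_of_le (by omega)
        rw [this]
        simp [pvPat]
    rw [hz]
    ring

-- ===== VERDICT (by name: the statement is the Claim_ definition above) =====
theorem solution_spec : Claim_equal_solution := by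
  intro ingredient _
  unfold Spec_solution solution solution_alt
  rw [loopA_eq_countB ingredient 0 0 (by norm_num) (fun k hk => absurd hk (by omega))]
  omega
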